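-- pv_equiv track=rewrite | github.com/jake-the-destroyer/Ant-TSP | Ant-TSP-master/RSTAnt2.py | reduceHananGraph
-- ===== SOURCE A (Python) =====
-- def reduceHananGraph(hannan_graph):
--   #Use the convex hull reduction algorithm to reduce the number of steiner points
--   for i in range(len(hannan_graph)):
--     for j in range(len(hannan_graph[i])):
--       #If the point is a Steiner point...
--       if hannan_graph[i][j] == 2:
--
--         left = (i - 1)
--         right = (i + 1)
--         up = (j - 1)
--         down = (j + 1)
--
--         foundLeft = False
--         foundRight = False
--         foundUp = False
--         foundDown = False
--         keep = False
--
--         while (foundLeft == False and left >= 0):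
--           point = hannan_graph[left][j]
--           if point == 2:
--             foundLeft = True
--           elif point == 1:
--             keep = True
--             foundLeft = True
--           else:
--             left = left - 1
--
--         if not keep:
--
--           while (foundRight == False and right < len(hannan_graph)):
--             point = hannan_graph[right][j]
--             if point == 2:
--               foundRight = True
--             elif point == 1:
--               keep = True
--               foundRight = True
--             else:
--               right = right + 1
--
--           if not keep:
--             while (foundUp == False and up >= 0):
--               point = hannan_graph[i][up]
--               if point == 2:
--                 foundUp = True
--               elif point == 1:
--                 keep = True
--                 foundUp = True
--               else:
--                 up = (up - 1)
--
--             if not keep: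
--               while (foundDown == False and down < len(hannan_graph[i])):
--                 point = hannan_graph[i][down]
--                 if point == 2:
--                   foundDown = True
--                 elif point == 1:
--                   keep = True
--                   foundDown = True
--                 else:
--                   down = (down + 1)
--
--         '''
--         If the adjacent points to current Steiner point are ALL steiner points,
--         find the points of intersection of these points on the horizontal axes.
--         If these points are also steiner we may delete the original point.
--         '''
--         if (not keep) and (foundLeft or foundRight) and (foundUp or foundDown):
--
--           if (foundLeft and foundUp):
--             if hannan_graph[left][up] == 2:
--               hannan_graph[i][j] = 0
--           elif (foundRight and foundUp):
--             if hannan_graph[right][up] == 2: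
--               hannan_graph[i][j] = 0
--           elif (foundLeft and foundDown):
--             if hannan_graph[left][down] == 2:
--               hannan_graph[i][j] = 0
--           elif (foundRight and foundDown):
--             if hannan_graph[right][down] == 2:
--               hannan_graph[i][j] = 0
--
--   return hannan_graph
-- ===== SOURCE B (Python) =====
-- def reduceHananGraph(hannan_graph):
--   # One row-major sweep: forward neighbours from next-occupied tables
--   # precomputed on the original grid (cells ahead of the sweep are still
--   # untouched), backward neighbours from O(1)-maintained last-occupied
--   # trackers.  Ragged rows are handled by treating absent cells as empty.
--   g = hannan_graph
--   n = len(g)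
--   maxm = max((len(row) for row in g), default=0)
--
--   def occ(v):
--     return v == 1 or v == 2
--
--   # nxt_row[i][j]: smallest j' > j with g[i][j'] occupied, else len(g[i])
--   nxt_row = []
--   for i in range(n):
--     mi = len(g[i])
--     nz = mi
--     row = [mi] * mi
--     for j in range(mi - 1, -1, -1):
--       row[j] = nz
--       if occ(g[i][j]):
--         nz = j
--     nxt_row.append(row)
--
--   # nxt_col_t[j][i]: smallest i' > i with g[i'][j] occupied, else n
--   nxt_col_t = []
--   for j in range(maxm):
--     nz = n
--     col = [n] * n
--     for i in range(n - 1, -1, -1):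
--       col[i] = nz
--       if j < len(g[i]) and occ(g[i][j]):
--         nz = i
--     nxt_col_t.append(col)
--
--   prev_col = [-1] * maxm       # nearest occupied row above, per column (current grid)
--   for i in range(n):
--     mi = len(g[i])
--     prev_row = -1              # nearest occupied column to the left (current grid)
--     for j in range(mi):
--       if g[i][j] == 2:
--         L = prev_col[j]
--         R = nxt_col_t[j][i]
--         U = prev_row
--         D = nxt_row[i][j]
--         keep = ((L >= 0 and g[L][j] == 1) or (R < n and g[R][j] == 1) or
--                 (U >= 0 and g[i][U] == 1) or (D < mi and g[i][D] == 1))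
--         if (not keep) and (L >= 0 or R < n) and (U >= 0 or D < mi):
--           if L >= 0 and U >= 0:
--             if g[L][U] == 2:
--               g[i][j] = 0
--           elif R < n and U >= 0:
--             if g[R][U] == 2:
--               g[i][j] = 0
--           elif L >= 0 and D < mi:
--             if g[L][D] == 2:
--               g[i][j] = 0
--           elif R < n and D < mi:
--             if g[R][D] == 2:
--               g[i][j] = 0
--       if occ(g[i][j]):
--         prev_row = j
--         prev_col[j] = i
--   return g
-- ===== Notes on version B (the rewrite author's own statement) =====
-- stated objective: alternative
-- what changed: Instead of re-scanning the four directions from scratch for every Steiner point (A), B makes one row-major sweep that reads the two forward neighbours from next-occupied tables precomputed on the original grid (valid because cells ahead of the sweep are never yet modified) and the two backward neighbours from last-occupied trackers maintained in O(1) per cell; on grids dense in Steiner points this replaces A's per-cell scans by table lookups, though the measured timing on the generated (sparse) inputs shows no speed-up.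
-- outside the precondition, e.g. on reduceHananGraph([[1, 2], [1, 1], [1]]): A returns [[1, 2], [1, 1], [1]], B returns [[1, 2], [1, 1], [1]]
import Mathlib
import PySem

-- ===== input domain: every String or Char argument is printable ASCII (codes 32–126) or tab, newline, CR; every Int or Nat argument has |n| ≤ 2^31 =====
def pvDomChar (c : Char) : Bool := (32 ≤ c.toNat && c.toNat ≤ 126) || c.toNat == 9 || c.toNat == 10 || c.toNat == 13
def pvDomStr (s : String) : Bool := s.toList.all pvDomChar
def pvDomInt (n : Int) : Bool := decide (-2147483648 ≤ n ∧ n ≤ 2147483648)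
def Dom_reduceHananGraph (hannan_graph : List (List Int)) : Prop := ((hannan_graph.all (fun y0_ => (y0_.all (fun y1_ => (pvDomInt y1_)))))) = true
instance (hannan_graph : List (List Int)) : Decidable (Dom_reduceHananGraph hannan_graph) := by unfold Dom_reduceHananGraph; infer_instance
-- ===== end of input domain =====

-- B replaces A's per-point directional re-scans with one sweep using precomputed
-- next-occupied tables and O(1)-updated last-occupied trackers (a different
-- algorithm, not measured faster on the generated inputs); both Pythons mutate
-- the argument grid in place identically, the theorems are about the return value.

-- ===== PORT A =====
-- shared low-level grid accessors (Python's g[r][c] reads / g[i][j] = v write,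
-- used only at indices in range under Pre_)
def getv (g : List (List Int)) (r c : Nat) : Int := (g.getD r []).getD c 0
def getI (g : List (List Int)) (r c : Int) : Int := (g.getD r.toNat []).getD c.toNat 0
def setv (g : List (List Int)) (i j : Nat) (v : Int) : List (List Int) :=
  g.set i ((g.getD i []).set j v)

-- A's downward while-loop (index decreasing while ≥ 0): returns (index, found, keep)
def scanDec (val : Nat → Int) : Nat → Int × Bool × Bool
  | 0 => (-1, false, false)
  | l+1 =>
    let point := val l
    if point == 2 then ((l : Int), true, false)
    else if point == 1 then ((l : Int), true, true)
    else scanDec val l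

-- A's upward while-loop (index increasing while < bound): returns (index, found, keep)
def scanInc (val : Nat → Int) (bound r : Nat) : Int × Bool × Bool :=
  if _h : r < bound then
    let point := val r
    if point == 2 then ((r : Int), true, false)
    else if point == 1 then ((r : Int), true, true)
    else scanInc val bound (r+1)
  else ((r : Int), false, false)
termination_by bound - r

-- A's body for one cell (i, j)
def stepA (g : List (List Int)) (i j : Nat) : List (List Int) :=
  if getv g i j == 2 then
    let s1 := scanDec (fun l => getv g l j) i
    let k1 := s1.2.2
    let s2 := if k1 then (((i : Int) + 1), false, false)
              else scanInc (fun r => getv g r j) g.length (i+1)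
    let k2 := k1 || s2.2.2
    let s3 := if k2 then ((j : Int) - 1, false, false)
              else scanDec (fun u => getv g i u) j
    let k3 := k2 || s3.2.2
    let s4 := if k3 then (((j : Int) + 1), false, false)
              else scanInc (fun d => getv g i d) (g.getD i []).length (j+1)
    let keep := k3 || s4.2.2
    if !keep && (s1.2.1 || s2.2.1) && (s3.2.1 || s4.2.1) then
      if s1.2.1 && s3.2.1 then (if getI g s1.1 s3.1 == 2 then setv g i j 0 else g)
      else if s2.2.1 && s3.2.1 then (if getI g s2.1 s3.1 == 2 then setv g i j 0 else g)
      else if s1.2.1 && s4.2.1 then (if getI g s1.1 s4.1 == 2 then setv g i j 0 else g)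
      else if s2.2.1 && s4.2.1 then (if getI g s2.1 s4.1 == 2 then setv g i j 0 else g)
      else g
    else g
  else g

def colsA (i m j : Nat) (g : List (List Int)) : List (List Int) :=
  if _h : j < m then colsA i m (j+1) (stepA g i j) else g
termination_by m - j

def rowsA (n i : Nat) (g : List (List Int)) : List (List Int) :=
  if _h : i < n then rowsA n (i+1) (colsA i (g.getD i []).length 0 g) else g
termination_by n - i

def reduceHananGraph (hannan_graph : List (List Int)) : List (List Int) :=
  rowsA hannan_graph.length 0 hannan_graph

-- ===== PORT B =====
def occB (v : Int) : Bool := v == 1 || v == 2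

-- Source B's descending table-building loop: processing the last k positions of 0..m-1,
-- returns (first occupied position among them, else m; table of next-occupied for them)
def buildNxt (p : Nat → Bool) (m : Nat) : Nat → Int × List Int
  | 0 => ((m : Int), [])
  | k+1 =>
    let r := buildNxt p m k
    let pos := m - (k+1)
    ((if p pos then (pos : Int) else r.1), r.1 :: r.2)

-- Source B's body for one cell (i, j): returns (grid, prev_col, prev_row)
def maxLen (g : List (List Int)) : Nat := g.foldr (fun row acc => max row.length acc) 0

-- Source B's body for one cell (i, j): returns (grid, prev_col, prev_row)
def cellB (n : Nat) (nxtR nxtCT : List (List Int)) (i j : Nat)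
    (g : List (List Int)) (prevCol : List Int) (prevRow : Int) :
    List (List Int) × List Int × Int :=
  let li := (g.getD i []).length
  let g' :=
    if getv g i j == 2 then
      let L : Int := prevCol.getD j (-1)
      let R : Int := (nxtCT.getD j []).getD i (n : Int)
      let U : Int := prevRow
      let D : Int := (nxtR.getD i []).getD j (li : Int)
      let keep := (decide (0 ≤ L) && (getI g L (j : Int) == 1)) ||
                  (decide (R < (n : Int)) && (getI g R (j : Int) == 1)) ||
                  (decide (0 ≤ U) && (getI g (i : Int) U == 1)) ||
                  (decide (D < (li : Int)) && (getI g (i : Int) D == 1))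
      if !keep && (decide (0 ≤ L) || decide (R < (n : Int))) &&
          (decide (0 ≤ U) || decide (D < (li : Int))) then
        if decide (0 ≤ L) && decide (0 ≤ U) then
          (if getI g L U == 2 then setv g i j 0 else g)
        else if decide (R < (n : Int)) && decide (0 ≤ U) then
          (if getI g R U == 2 then setv g i j 0 else g)
        else if decide (0 ≤ L) && decide (D < (li : Int)) then
          (if getI g L D == 2 then setv g i j 0 else g)
        else if decide (R < (n : Int)) && decide (D < (li : Int)) then
          (if getI g R D == 2 then setv g i j 0 else g)
        else g
      else g
    else g
  (g', if occB (getv g' i j) then prevCol.set j (i : Int) else prevCol,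
       if occB (getv g' i j) then ((j : Nat) : Int) else prevRow)

def colsB (n : Nat) (nxtR nxtCT : List (List Int)) (i mi j : Nat)
    (g : List (List Int)) (prevCol : List Int) (prevRow : Int) :
    List (List Int) × List Int :=
  if _h : j < mi then
    let s := cellB n nxtR nxtCT i j g prevCol prevRow
    colsB n nxtR nxtCT i mi (j+1) s.1 s.2.1 s.2.2
  else (g, prevCol)
termination_by mi - j

def rowsB (n : Nat) (nxtR nxtCT : List (List Int)) (i : Nat)
    (g : List (List Int)) (prevCol : List Int) : List (List Int) :=
  if _h : i < n then
    let s := colsB n nxtR nxtCT i (g.getD i []).length 0 g prevCol (-1)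
    rowsB n nxtR nxtCT (i+1) s.1 s.2
  else g
termination_by n - i

def reduceHananGraph_alt (hannan_graph : List (List Int)) : List (List Int) :=
  let n := hannan_graph.length
  let maxm := maxLen hannan_graph
  let nxtR := (List.range n).map (fun i =>
    (buildNxt (fun t => occB (getv hannan_graph i t))
      (hannan_graph.getD i []).length (hannan_graph.getD i []).length).2)
  let nxtCT := (List.range maxm).map (fun j =>
    (buildNxt (fun t => occB (getv hannan_graph t j)) n n).2)
  rowsB n nxtR nxtCT 0 hannan_graph (List.replicate maxm (-1))

-- ===== PRECONDITION & SPEC =====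
-- Pre_ requires every column holding a Steiner point (value 2) to exist in every
-- row (so any rectangular grid, and any ragged grid without a 2, is admitted);
-- on the remaining ragged grids A raises IndexError mid-scan, or returns only
-- because a scan happens to stop before the short row.
def Pre_reduceHananGraph (hannan_graph : List (List Int)) : Prop :=
  ∀ i < hannan_graph.length, ∀ j < (hannan_graph.getD i []).length,
    (hannan_graph.getD i []).getD j 0 = 2 →
      ∀ x < hannan_graph.length, j < (hannan_graph.getD x []).length
instance (hannan_graph : List (List Int)) : Decidable (Pre_reduceHananGraph hannan_graph) := by
  unfold Pre_reduceHananGraph; infer_instance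

def pvWitness_reduceHananGraph : List (List Int) := [[2, 2, 0], [0, 0, 2], [2, 0, 1]]

def Spec_reduceHananGraph (hannan_graph : List (List Int)) (out : List (List Int)) : Prop :=
  out = reduceHananGraph_alt hannan_graph
instance (hannan_graph : List (List Int)) (out : List (List Int)) :
    Decidable (Spec_reduceHananGraph hannan_graph out) := by
  unfold Spec_reduceHananGraph; infer_instance

-- ===== CLAIM (what is proved, stated in full; the proofs are below) =====
def Claim_equal_reduceHananGraph : Prop :=
  ∀ (hannan_graph : List (List Int)), Dom_reduceHananGraph hannan_graph →
    Pre_reduceHananGraph hannan_graph →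
    Spec_reduceHananGraph hannan_graph (reduceHananGraph hannan_graph)

-- ===== LEMMAS AND PROOFS =====

-- nearest occupied index strictly below j (Python scan result as an Option)
def bwd (p : Nat → Bool) : Nat → Option Nat
  | 0 => none
  | j+1 => if p j then some j else bwd p j

-- least occupied index in [r, b)
def fwd (p : Nat → Bool) (b r : Nat) : Option Nat :=
  if _h : r < b then (if p r then some r else fwd p b (r+1)) else none
termination_by b - r

def enc : Option Nat → Int
  | none => -1
  | some k => (k : Int)

def encF (b : Nat) : Option Nat → Int
  | none => (b : Int)
  | some k => (k : Int)


theorem scanDec_eq (val : Nat → Int) (j : Nat) :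
    scanDec val j = match bwd (fun k => occB (val k)) j with
      | none => (-1, false, false)
      | some l => ((l : Int), true, val l == 1) := by
  induction j with
  | zero => simp [scanDec, bwd]
  | succ l ih =>
    by_cases h2 : val l = 2
    · simp [scanDec, bwd, occB, h2]
    · by_cases h1 : val l = 1
      · simp [scanDec, bwd, occB, h1]
      · simp only [occB] at ih ⊢
        simp [scanDec, bwd, h1, h2, ih]

theorem scanInc_eq (val : Nat → Int) (b r : Nat) (h : r ≤ b) :
    scanInc val b r = match fwd (fun k => occB (val k)) b r with
      | none => ((b : Int), false, false)
      | some q => ((q : Int), true, val q == 1) := by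
  rw [scanInc, fwd]
  by_cases hr : r < b
  · by_cases h2 : val r = 2
    · simp [hr, occB, h2]
    · by_cases h1 : val r = 1
      · simp [hr, occB, h1]
      · have ih := scanInc_eq val b (r+1) (by omega)
        simp [hr, occB, h1, h2, ih]
  · have hrb : r = b := by omega
    simp [hrb]
termination_by b - r

theorem fwd_congr (p q : Nat → Bool) (b r : Nat)
    (h : ∀ k, r ≤ k → k < b → p k = q k) : fwd p b r = fwd q b r := by
  by_cases hr : r < b
  · have hp := h r (le_refl r) hr
    have ih := fwd_congr p q b (r+1) (fun k hk1 hk2 => h k (by omega) hk2)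
    rw [fwd]; conv_rhs => rw [fwd]
    simp [hr, hp, ih]
  · rw [fwd]; conv_rhs => rw [fwd]
    simp [hr]
termination_by b - r

theorem bwd_congr (p q : Nat → Bool) (j : Nat)
    (h : ∀ k, k < j → p k = q k) : bwd p j = bwd q j := by
  induction j with
  | zero => rfl
  | succ l ih =>
    simp only [bwd, h l (by omega), ih (fun k hk => h k (by omega))]

theorem fwd_some (p : Nat → Bool) (b r q : Nat) (h : fwd p b r = some q) :
    r ≤ q ∧ q < b ∧ p q = true := by
  rw [fwd] at h
  by_cases hr : r < b
  · by_cases hp : p r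
    · simp [hr, hp] at h
      subst h; exact ⟨le_refl _, hr, hp⟩
    · simp [hr, hp] at h
      obtain ⟨h1, h2, h3⟩ := fwd_some p b (r+1) q h
      exact ⟨by omega, h2, h3⟩
  · simp [hr] at h
termination_by b - r

theorem buildNxt_spec (p : Nat → Bool) (m : Nat) :
    ∀ k, k ≤ m →
      (buildNxt p m k).1 = encF m (fwd p m (m - k)) ∧
      (∀ t d, t < k → ((buildNxt p m k).2).getD t d = encF m (fwd p m (m - k + t + 1))) := by
  intro k
  induction k with
  | zero =>
    intro _
    constructor
    · rw [fwd]; simp [buildNxt, encF]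
    · intro t d ht; omega
  | succ k ih =>
    intro hk
    obtain ⟨ih1, ih2⟩ := ih (by omega)
    have hpos : m - (k+1) < m := by omega
    have hsucc : m - (k+1) + 1 = m - k := by omega
    have hfwd : fwd p m (m - (k+1)) =
        if p (m - (k+1)) then some (m - (k+1)) else fwd p m (m - k) := by
      rw [fwd]; simp [hpos, hsucc]
    constructor
    · simp only [buildNxt]
      by_cases hp : p (m - (k+1))
      · simp [hp, hfwd, encF]
      · simp [hp, hfwd, ih1]
    · intro t d ht
      match t with
      | 0 =>
        simp only [buildNxt, List.getD]
        simpa [hsucc] using ih1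
      | Nat.succ t' =>
        have ht' : t' < k := by omega
        have := ih2 t' d ht'
        simp only [buildNxt, List.getD] at this ⊢
        have harith : m - (k+1) + (t'+1) + 1 = m - k + t' + 1 := by omega
        rw [harith]
        simpa using this


-- clean common form of the per-cell decision, parameterised by the four
-- nearest-occupied neighbours (options)
-- clean common form of the per-cell decision, parameterised by the four
-- nearest-occupied neighbours (options)
def refStep (g : List (List Int)) (i j : Nat) (oL oR oU oD : Option Nat) : List (List Int) :=
  if getv g i j == 2 then
    let corner : Nat → Nat → List (List Int) := fun x y =>
      if getv g x y == 2 then setv g i j 0 else g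
    let kL := oL.elim false (fun l => getv g l j == 1)
    let kR := oR.elim false (fun r => getv g r j == 1)
    let kU := oU.elim false (fun u => getv g i u == 1)
    let kD := oD.elim false (fun d => getv g i d == 1)
    if kL || kR || kU || kD then g
    else
      oU.elim
        (oD.elim g (fun dd =>
          oL.elim (oR.elim g (fun rr => corner rr dd)) (fun ll => corner ll dd)))
        (fun uu => oL.elim (oR.elim g (fun rr => corner rr uu)) (fun ll => corner ll uu))
  else g

def occCol (g : List (List Int)) (c : Nat) : Nat → Bool := fun r => occB (getv g r c)
def occRow (g : List (List Int)) (i : Nat) : Nat → Bool := fun c => occB (getv g i c)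

theorem getI_cast (g : List (List Int)) (a b : Nat) :
    getI g (a : Int) (b : Int) = getv g a b := by
  simp [getI, getv]

theorem stepA_char (g : List (List Int)) (i j : Nat)
    (hi : i < g.length) (hj : j < (g.getD i []).length) :
    stepA g i j = refStep g i j (bwd (occCol g j) i) (fwd (occCol g j) g.length (i+1))
      (bwd (occRow g i) j) (fwd (occRow g i) (g.getD i []).length (j+1)) := by
  rw [stepA, refStep]
  have e1 := scanDec_eq (fun l => getv g l j) i
  have e2 := scanInc_eq (fun r => getv g r j) g.length (i+1) (by omega)
  have e3 := scanDec_eq (fun u => getv g i u) j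
  have e4 := scanInc_eq (fun d => getv g i d) (g.getD i []).length (j+1) (by omega)
  have hoc : (fun k => occB ((fun l => getv g l j) k)) = occCol g j := rfl
  have hor : (fun k => occB ((fun u => getv g i u) k)) = occRow g i := rfl
  rw [hoc] at e1 e2
  rw [hor] at e3 e4
  by_cases hg : getv g i j = 2
  case neg => simp [hg]
  rcases hL : bwd (occCol g j) i with _ | l <;>
    rcases hR : fwd (occCol g j) g.length (i+1) with _ | r <;>
    rcases hU : bwd (occRow g i) j with _ | u <;>
    rcases hD : fwd (occRow g i) (g.getD i []).length (j+1) with _ | d <;>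
    rw [hL] at e1 <;> rw [hR] at e2 <;> rw [hU] at e3 <;> rw [hD] at e4 <;>
    simp [hi] at e1 e2 e3 e4 <;>
    (try by_cases hvL : getv g l j = 1) <;>
    (try by_cases hvR : getv g r j = 1) <;>
    (try by_cases hvU : getv g i u = 1) <;>
    (try by_cases hvD : getv g i d = 1) <;>
    simp [*, Option.elim, getI_cast]

def Unch (g0 g : List (List Int)) (i j : Nat) : Prop :=
  ∀ r c : Nat, (i < r ∨ (r = i ∧ j ≤ c)) → getv g r c = getv g0 r c

def TrackCol (g : List (List Int)) (m i j : Nat) (prevCol : List Int) : Prop :=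
  prevCol.length = m ∧ ∀ c : Nat, c < m →
    prevCol.getD c (-1) = enc (bwd (occCol g c) (if c < j then i+1 else i))

def TrackRow (g : List (List Int)) (i j : Nat) (prevRow : Int) : Prop :=
  prevRow = enc (bwd (occRow g i) j)

def LoopInv (g0 : List (List Int)) (m : Nat) (g : List (List Int)) (i j : Nat)
    (prevCol : List Int) (prevRow : Int) : Prop :=
  g.length = g0.length ∧
  (∀ r : Nat, (g.getD r []).length = (g0.getD r []).length) ∧
  Unch g0 g i j ∧ TrackCol g m i j prevCol ∧ TrackRow g i j prevRow

theorem setv_length (g : List (List Int)) (i j : Nat) (v : Int) :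
    (setv g i j v).length = g.length := by simp [setv]

theorem setv_getD (g : List (List Int)) (i j : Nat) (v : Int) (r : Nat) :
    (setv g i j v).getD r [] =
      if r = i ∧ r < g.length then ((g.getD i []).set j v) else g.getD r [] := by
  simp only [setv, List.getD_eq_getElem?_getD]
  by_cases hr : r = i
  · subst hr
    by_cases hlen : r < g.length
    · simp [List.getElem?_set_eq_of_lt _ hlen, hlen]
    · have h1 : (g.set r ((g[r]?.getD []).set j v))[r]? = none := by
        rw [List.getElem?_eq_none]; simpa using (by omega : g.length ≤ r)
      have h2 : g[r]? = none := List.getElem?_eq_none (by omega)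
      simp [h1, h2, hlen]
  · rw [List.getElem?_set_ne (fun hh => hr hh.symm)]
    simp [hr]

theorem setv_rowlen (g : List (List Int)) (i j : Nat) (v : Int) (r : Nat) :
    ((setv g i j v).getD r []).length = ((g.getD r []).length) := by
  rw [setv_getD]
  split_ifs with h
  · rw [h.1]; simp
  · rfl

theorem getv_setv_ne (g : List (List Int)) (i j : Nat) (v : Int) (r c : Nat)
    (h : r ≠ i ∨ c ≠ j) : getv (setv g i j v) r c = getv g r c := by
  unfold getv
  rw [setv_getD]
  split_ifs with hcase
  · have hc : c ≠ j := by tauto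
    rw [hcase.1]
    simp [List.getD_eq_getElem?_getD, List.getElem?_set_ne (fun hh => hc hh.symm)]
  · rfl

theorem refStep_cases (g : List (List Int)) (i j : Nat) (oL oR oU oD : Option Nat) :
    refStep g i j oL oR oU oD = g ∨ refStep g i j oL oR oU oD = setv g i j 0 := by
  rcases oL with _ | l <;> rcases oR with _ | r <;> rcases oU with _ | u <;>
    rcases oD with _ | d <;> simp [refStep, Option.elim] <;> (try split_ifs) <;> tauto

theorem getv_out (g : List (List Int)) (i c : Nat)
    (h : (g.getD i []).length ≤ c) : getv g i c = 0 := by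
  unfold getv
  rw [List.getD_eq_getElem?_getD, List.getElem?_eq_none h]
  rfl

theorem rowlen_le_maxLen (g : List (List Int)) : ∀ i : Nat, (g.getD i []).length ≤ maxLen g := by
  induction g with
  | nil => intro i; simp [maxLen]
  | cons hd tl ih =>
    intro i
    cases i with
    | zero => simp [maxLen, List.getD]
    | succ k =>
      have := ih k
      simp only [maxLen, List.foldr] at *
      simp only [List.getD_cons_succ]
      omega

theorem cellB_char (g0 : List (List Int)) (n M : Nat) (nxtR nxtCT : List (List Int))
    (hNR : ∀ i' j', i' < n → j' < (g0.getD i' []).length →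
      (nxtR.getD i' []).getD j' ((g0.getD i' []).length : Int)
        = encF (g0.getD i' []).length (fwd (occRow g0 i') (g0.getD i' []).length (j'+1)))
    (hNCT : ∀ j' i', j' < M → i' < n →
      (nxtCT.getD j' []).getD i' (n : Int) = encF n (fwd (occCol g0 j') n (i'+1)))
    (g : List (List Int)) (prevCol : List Int) (prevRow : Int) (i j : Nat)
    (hi : i < n) (hj : j < (g.getD i []).length) (hjM : j < M)
    (hgl : g.length = n) (hrow : (g.getD i []).length = (g0.getD i []).length)
    (hUn : Unch g0 g i j)
    (hC : TrackCol g M i j prevCol) (hR : TrackRow g i j prevRow) :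
    (cellB n nxtR nxtCT i j g prevCol prevRow).1 =
      refStep g i j (bwd (occCol g j) i) (fwd (occCol g j) n (i+1))
        (bwd (occRow g i) j) (fwd (occRow g i) (g.getD i []).length (j+1)) := by
  have hL : prevCol.getD j (-1) = enc (bwd (occCol g j) i) := by
    have := hC.2 j hjM
    simpa using this
  have hUeq : prevRow = enc (bwd (occRow g i) j) := hR
  have hRfw : fwd (occCol g j) n (i+1) = fwd (occCol g0 j) n (i+1) := by
    apply fwd_congr
    intro k hk1 hk2
    simp [occCol, hUn k j (Or.inl (by omega))]
  have hDfw : fwd (occRow g i) (g.getD i []).length (j+1)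
      = fwd (occRow g0 i) (g.getD i []).length (j+1) := by
    apply fwd_congr
    intro k hk1 hk2
    simp [occRow, hUn i k (Or.inr ⟨rfl, by omega⟩)]
  have hRt : (nxtCT.getD j []).getD i (n : Int) = encF n (fwd (occCol g j) n (i+1)) := by
    rw [hNCT j i hjM hi, hRfw]
  have hDt : (nxtR.getD i []).getD j (((g.getD i []).length : Nat) : Int)
      = encF (g.getD i []).length (fwd (occRow g i) (g.getD i []).length (j+1)) := by
    have h0 := hNR i j hi (by omega)
    rw [← hrow] at h0
    rw [h0, hDfw]
  rw [cellB]
  rcases hoL : bwd (occCol g j) i with _ | l <;>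
    rcases hoR : fwd (occCol g j) n (i+1) with _ | r <;>
    rcases hoU : bwd (occRow g i) j with _ | u <;>
    rcases hoD : fwd (occRow g i) (g.getD i []).length (j+1) with _ | d <;>
    rw [hoL] at hL <;> rw [hoR] at hRt <;> rw [hoU] at hUeq <;> rw [hoD] at hDt <;>
    (try have hrn : r < n := (fwd_some _ _ _ _ hoR).2.1) <;>
    (try have hdm : d < (g.getD i []).length := (fwd_some _ _ _ _ hoD).2.1) <;>
    simp only [hL, hRt, hUeq, hDt, enc, encF] <;>
    (try by_cases hvL : getv g l j = 1) <;>
    (try by_cases hvR : getv g r j = 1) <;>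
    (try by_cases hvU : getv g i u = 1) <;>
    (try by_cases hvD : getv g i d = 1) <;>
    simp [refStep, Option.elim, getI_cast, *] <;> (try (split_ifs <;> rfl)) <;> (try rfl) <;> (try simp_all)

theorem inv_step (g0 : List (List Int)) (n M : Nat) (nxtR nxtCT : List (List Int))
    (hNR : ∀ i' j', i' < n → j' < (g0.getD i' []).length →
      (nxtR.getD i' []).getD j' ((g0.getD i' []).length : Int)
        = encF (g0.getD i' []).length (fwd (occRow g0 i') (g0.getD i' []).length (j'+1)))
    (hNCT : ∀ j' i', j' < M → i' < n →
      (nxtCT.getD j' []).getD i' (n : Int) = encF n (fwd (occCol g0 j') n (i'+1)))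
    (hn : n = g0.length) (hML : ∀ r : Nat, (g0.getD r []).length ≤ M)
    (g : List (List Int)) (prevCol : List Int) (prevRow : Int) (i j : Nat)
    (hi : i < n) (hj : j < (g0.getD i []).length)
    (hInv : LoopInv g0 M g i j prevCol prevRow) :
    (cellB n nxtR nxtCT i j g prevCol prevRow).1 = stepA g i j ∧
    LoopInv g0 M (cellB n nxtR nxtCT i j g prevCol prevRow).1 i (j+1)
      (cellB n nxtR nxtCT i j g prevCol prevRow).2.1
      (cellB n nxtR nxtCT i j g prevCol prevRow).2.2 := by
  obtain ⟨hlen, hrows, hUn, hC, hTR⟩ := hInv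
  have hgl : g.length = n := by rw [hlen, hn]
  have hrow : (g.getD i []).length = (g0.getD i []).length := hrows i
  have hj' : j < (g.getD i []).length := by omega
  have hjM : j < M := by have := hML i; omega
  have hstep := stepA_char g i j (by omega) hj'
  rw [hgl] at hstep
  have hcell := cellB_char g0 n M nxtR nxtCT hNR hNCT g prevCol prevRow i j hi hj' hjM
    hgl hrow hUn hC hTR
  have h1 : (cellB n nxtR nxtCT i j g prevCol prevRow).1 = stepA g i j := by
    rw [hcell, hstep]
  have hG : cellB n nxtR nxtCT i j g prevCol prevRow =
      ((cellB n nxtR nxtCT i j g prevCol prevRow).1,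
       if occB (getv (cellB n nxtR nxtCT i j g prevCol prevRow).1 i j)
         then prevCol.set j (i : Int) else prevCol,
       if occB (getv (cellB n nxtR nxtCT i j g prevCol prevRow).1 i j)
         then ((j : Nat) : Int) else prevRow) := rfl
  set G := (cellB n nxtR nxtCT i j g prevCol prevRow).1 with hG1
  have hGstep : G = stepA g i j := h1
  have hGcase : G = g ∨ G = setv g i j 0 := by
    rw [hGstep, hstep]; exact refStep_cases g i j _ _ _ _
  have hGlen : G.length = g.length := by
    rcases hGcase with h | h <;> rw [h] <;> simp [setv_length]
  have hGrow : ∀ r, (G.getD r []).length = (g.getD r []).length := by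
    intro r; rcases hGcase with h | h <;> rw [h]
    exact setv_rowlen g i j 0 r
  have hGne : ∀ r c : Nat, (r ≠ i ∨ c ≠ j) → getv G r c = getv g r c := by
    intro r c hrc; rcases hGcase with h | h <;> rw [h]
    exact getv_setv_ne g i j 0 r c hrc
  rw [hG]
  refine ⟨h1, ?_, ?_, ?_, ?_, ?_⟩
  · rw [hGlen, hlen]
  · intro r; rw [hGrow r, hrows r]
  · intro r c hcond
    have hne : r ≠ i ∨ c ≠ j := by omega
    rw [hGne r c hne]
    apply hUn
    rcases hcond with h | ⟨h1', h2'⟩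
    · exact Or.inl h
    · exact Or.inr ⟨h1', by omega⟩
  · constructor
    · split_ifs <;> simp [hC.1]
    · intro c hc
      have hcongr_ne : ∀ c', c' ≠ j → ∀ t, bwd (occCol G c') t = bwd (occCol g c') t := by
        intro c' hc' t
        apply bwd_congr
        intro k _
        simp [occCol, hGne k c' (Or.inr hc')]
      have hcongr_lt : bwd (occCol G j) i = bwd (occCol g j) i := by
        apply bwd_congr
        intro k hk
        simp [occCol, hGne k j (Or.inl (by omega))]
      by_cases hcj : c = j
      · subst hcj
        have hclen : c < prevCol.length := by rw [hC.1]; omega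
        have hbwd : bwd (occCol G c) (i+1) =
            if occB (getv G i c) then some i else bwd (occCol g c) i := by
          simp only [bwd, occCol]
          rw [hcongr_lt]
          try rfl
        have hold : prevCol.getD c (-1) = enc (bwd (occCol g c) i) := by
          simpa using hC.2 c hc
        simp only [show c < c + 1 from by omega, if_pos]
        split_ifs with hocc
        · simp [List.getD_eq_getElem?_getD, List.getElem?_set_eq_of_lt _ hclen,
            hbwd, hocc, enc]
        · simp [hbwd, hocc, hold]
          exact hold
      · have hold := hC.2 c hc
        have hset : (if occB (getv G i j) then prevCol.set j (i : Int) else prevCol).getD c (-1)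
            = prevCol.getD c (-1) := by
          split_ifs
          · simp [List.getD_eq_getElem?_getD, List.getElem?_set_ne (fun hh => hcj hh.symm)]
          · rfl
        rw [hset, hold, hcongr_ne c hcj]
        by_cases hcltj : c < j
        · simp [hcltj, show c < j + 1 from by omega]
        · simp [hcltj, show ¬ c < j + 1 from by omega]
  · have hbwd : bwd (occRow G i) (j+1) =
        if occB (getv G i j) then some j else bwd (occRow g i) j := by
      simp only [bwd, occRow]
      congr 1
      apply bwd_congr
      intro k hk
      simp [occRow, hGne i k (Or.inr (by omega))]
    unfold TrackRow
    split_ifs with hocc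
    · rw [hbwd]; simp [hocc, enc]
    · rw [hbwd, if_neg hocc]
      exact hTR

theorem cols_eq (g0 : List (List Int)) (n M : Nat) (nxtR nxtCT : List (List Int))
    (hNR : ∀ i' j', i' < n → j' < (g0.getD i' []).length →
      (nxtR.getD i' []).getD j' ((g0.getD i' []).length : Int)
        = encF (g0.getD i' []).length (fwd (occRow g0 i') (g0.getD i' []).length (j'+1)))
    (hNCT : ∀ j' i', j' < M → i' < n →
      (nxtCT.getD j' []).getD i' (n : Int) = encF n (fwd (occCol g0 j') n (i'+1)))
    (hn : n = g0.length) (hML : ∀ r : Nat, (g0.getD r []).length ≤ M)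
    (i : Nat) (hi : i < n) (j : Nat) (g : List (List Int)) (pc : List Int) (pr : Int)
    (hj : j ≤ (g0.getD i []).length) (hInv : LoopInv g0 M g i j pc pr) :
    colsA i (g0.getD i []).length j g
      = (colsB n nxtR nxtCT i (g0.getD i []).length j g pc pr).1 ∧
    (colsB n nxtR nxtCT i (g0.getD i []).length j g pc pr).1.length = g0.length ∧
    (∀ r : Nat, ((colsB n nxtR nxtCT i (g0.getD i []).length j g pc pr).1.getD r []).length
      = (g0.getD r []).length) ∧
    Unch g0 (colsB n nxtR nxtCT i (g0.getD i []).length j g pc pr).1 i (g0.getD i []).length ∧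
    TrackCol (colsB n nxtR nxtCT i (g0.getD i []).length j g pc pr).1 M i (g0.getD i []).length
      (colsB n nxtR nxtCT i (g0.getD i []).length j g pc pr).2 := by
  by_cases h : j < (g0.getD i []).length
  · rw [colsA, colsB]
    simp only [dif_pos h]
    have hstep := inv_step g0 n M nxtR nxtCT hNR hNCT hn hML g pc pr i j hi h hInv
    rw [← hstep.1]
    exact cols_eq g0 n M nxtR nxtCT hNR hNCT hn hML i hi (j+1) _ _ _ (by omega) hstep.2
  · have hjm : j = (g0.getD i []).length := by omega
    subst hjm
    rw [colsA, colsB]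
    simp only [dif_neg h]
    exact ⟨trivial, hInv.1, hInv.2.1, hInv.2.2.1, hInv.2.2.2.1⟩
termination_by (g0.getD i []).length - j
decreasing_by omega

theorem rows_eq (g0 : List (List Int)) (n M : Nat) (nxtR nxtCT : List (List Int))
    (hNR : ∀ i' j', i' < n → j' < (g0.getD i' []).length →
      (nxtR.getD i' []).getD j' ((g0.getD i' []).length : Int)
        = encF (g0.getD i' []).length (fwd (occRow g0 i') (g0.getD i' []).length (j'+1)))
    (hNCT : ∀ j' i', j' < M → i' < n →
      (nxtCT.getD j' []).getD i' (n : Int) = encF n (fwd (occCol g0 j') n (i'+1)))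
    (hn : n = g0.length) (hML : ∀ r : Nat, (g0.getD r []).length ≤ M)
    (i : Nat) (g : List (List Int)) (pc : List Int)
    (hlen : g.length = g0.length)
    (hrows : ∀ r : Nat, (g.getD r []).length = (g0.getD r []).length)
    (hUn : Unch g0 g i 0) (hC : TrackCol g M i 0 pc) :
    rowsA n i g = rowsB n nxtR nxtCT i g pc := by
  by_cases h : i < n
  · rw [rowsA, rowsB]
    simp only [dif_pos h]
    have hm : (g.getD i []).length = (g0.getD i []).length := hrows i
    rw [hm]
    have hTR0 : TrackRow g i 0 (-1) := rfl
    have hcols := cols_eq g0 n M nxtR nxtCT hNR hNCT hn hML i h 0 g pc (-1)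
      (by omega) ⟨hlen, hrows, hUn, hC, hTR0⟩
    obtain ⟨heq, hl2, hr2, hu2, hc2⟩ := hcols
    rw [heq]
    apply rows_eq g0 n M nxtR nxtCT hNR hNCT hn hML (i+1) _ _ hl2 hr2
    · intro r c hcond
      apply hu2
      left
      omega
    · refine ⟨hc2.1, ?_⟩
      intro c hcM
      have hval := hc2.2 c hcM
      rw [if_neg (show ¬ c < 0 from by omega)]
      by_cases hcmi : c < (g0.getD i []).length
      · rw [if_pos hcmi] at hval
        exact hval
      · rw [if_neg hcmi] at hval
        have hlen' : (((colsB n nxtR nxtCT i (g0.getD i []).length 0 g pc (-1)).1.getD i []).length) ≤ c := by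
          rw [hr2 i]; omega
        have hocc0 : occCol (colsB n nxtR nxtCT i (g0.getD i []).length 0 g pc (-1)).1 c i = false := by
          unfold occCol
          rw [getv_out _ _ _ hlen']
          rfl
        have hb : bwd (occCol (colsB n nxtR nxtCT i (g0.getD i []).length 0 g pc (-1)).1 c) (i+1)
            = bwd (occCol (colsB n nxtR nxtCT i (g0.getD i []).length 0 g pc (-1)).1 c) i := by
          show (if occCol (colsB n nxtR nxtCT i (g0.getD i []).length 0 g pc (-1)).1 c i
              then some i
              else bwd (occCol (colsB n nxtR nxtCT i (g0.getD i []).length 0 g pc (-1)).1 c) i)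
            = bwd (occCol (colsB n nxtR nxtCT i (g0.getD i []).length 0 g pc (-1)).1 c) i
          rw [hocc0]
          simp
        rw [hb]
        exact hval
  · rw [rowsA, rowsB]
    simp only [dif_neg h]
termination_by n - i

-- ===== VERDICT (by name: the statement is the Claim_ definition above) =====
theorem reduceHananGraph_spec : Claim_equal_reduceHananGraph := by
  intro hg _hDom _hPre
  unfold Spec_reduceHananGraph reduceHananGraph reduceHananGraph_alt
  have hNR : ∀ i' j', i' < hg.length → j' < (hg.getD i' []).length →
      ((((List.range hg.length).map (fun i =>
          (buildNxt (fun t => occB (getv hg i t))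
            (hg.getD i []).length (hg.getD i []).length).2)).getD i' []).getD j'
        (((hg.getD i' []).length : Nat) : Int))
        = encF (hg.getD i' []).length
            (fwd (occRow hg i') (hg.getD i' []).length (j'+1)) := by
    intro i' j' hi' hj'
    have h1 : (((List.range hg.length).map (fun i =>
        (buildNxt (fun t => occB (getv hg i t))
          (hg.getD i []).length (hg.getD i []).length).2)).getD i' [])
        = (buildNxt (fun t => occB (getv hg i' t))
            (hg.getD i' []).length (hg.getD i' []).length).2 := by
      simp [List.getD_eq_getElem?_getD, List.getElem?_map, List.getElem?_range, hi']
    rw [h1]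
    have h2 := (buildNxt_spec (fun t => occB (getv hg i' t))
      (hg.getD i' []).length (hg.getD i' []).length le_rfl).2 j'
      (((hg.getD i' []).length : Nat) : Int) hj'
    simpa [Nat.sub_self, occRow] using h2
  have hNCT : ∀ j' i', j' < maxLen hg → i' < hg.length →
      ((((List.range (maxLen hg)).map (fun j =>
          (buildNxt (fun t => occB (getv hg t j)) hg.length hg.length).2)).getD j' []).getD i'
        ((hg.length : Nat) : Int))
        = encF hg.length (fwd (occCol hg j') hg.length (i'+1)) := by
    intro j' i' hj' hi'
    have h1 : (((List.range (maxLen hg)).map (fun j =>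
        (buildNxt (fun t => occB (getv hg t j)) hg.length hg.length).2)).getD j' [])
        = (buildNxt (fun t => occB (getv hg t j')) hg.length hg.length).2 := by
      simp [List.getD_eq_getElem?_getD, List.getElem?_map, List.getElem?_range, hj']
    rw [h1]
    have h2 := (buildNxt_spec (fun t => occB (getv hg t j')) hg.length hg.length le_rfl).2
      i' ((hg.length : Nat) : Int) hi'
    simpa [Nat.sub_self, occCol] using h2
  have hC0 : TrackCol hg (maxLen hg) 0 0 (List.replicate (maxLen hg) (-1)) := by
    constructor
    · simp
    · intro c hc
      simp [List.getD_eq_getElem?_getD, List.getElem?_replicate, hc, bwd, enc]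
  exact rows_eq hg hg.length (maxLen hg) _ _ hNR hNCT rfl (rowlen_le_maxLen hg) 0 hg
    (List.replicate (maxLen hg) (-1)) rfl (fun r => rfl) (fun r c _ => rfl) hC0
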